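-- pv_equiv track=rewrite | github.com/YHHuan/LUMEN | lumen/agents/harmonizer.py | _fallback_cluster
-- ===== SOURCE A (Python) =====
-- def _fallback_cluster(names: list[str]) -> dict[str, list[str]]:
--     """Simple lowercased grouping fallback."""
--     clusters: dict[str, list[str]] = {}
--     for name in names:
--         key = name.lower().strip()
--         found = False
--         for canonical in clusters:
--             if canonical.lower().strip() == key:
--                 clusters[canonical].append(name)
--                 found = True
--                 break
--         if not found:
--             clusters[name] = [name]
--     return clusters
-- ===== SOURCE B (Python) =====
-- def _fallback_cluster(names: list[str]) -> dict[str, list[str]]: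
--     """Simple lowercased grouping fallback (two-pass: canonical index, then grouping)."""
--     index: dict[str, str] = {}
--     result: dict[str, list[str]] = {}
--     for name in names:
--         key = name.lower().strip()
--         if key not in index:
--             index[key] = name
--             result[name] = []
--     for name in names:
--         result[index[name.lower().strip()]].append(name)
--     return result
-- ===== Notes on version B (the rewrite author's own statement) =====
-- stated objective: faster
-- what changed: Replaced A's find-or-create loop that linearly rescans (and re-normalizes) all existing cluster keys for every name with two passes: one pass builds a hash index from normalized key to canonical name (creating empty buckets in first-appearance order), a second pass appends each name to its bucket via a single dict lookup.
import Mathlib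
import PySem

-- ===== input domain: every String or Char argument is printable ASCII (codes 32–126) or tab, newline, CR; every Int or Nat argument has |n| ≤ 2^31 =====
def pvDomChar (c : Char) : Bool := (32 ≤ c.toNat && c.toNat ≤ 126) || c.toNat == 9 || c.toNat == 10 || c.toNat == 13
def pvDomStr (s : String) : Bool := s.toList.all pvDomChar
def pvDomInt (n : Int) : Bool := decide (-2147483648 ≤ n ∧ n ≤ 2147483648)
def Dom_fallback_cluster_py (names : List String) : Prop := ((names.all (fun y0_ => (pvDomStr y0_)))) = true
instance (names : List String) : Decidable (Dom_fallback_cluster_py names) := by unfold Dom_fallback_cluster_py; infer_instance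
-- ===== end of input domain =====

-- B replaces A's per-name linear rescans of the existing cluster keys with two passes over the
-- names using a hash index from normalized key to canonical name (objective: faster).

-- ===== PORT A =====
-- name.lower().strip()
def pvNorm (s : String) : String := PySem.Str.strip (PySem.Str.lower s)

-- A's inner `for canonical in clusters: if canonical.lower().strip() == key: … break`
def fbFind (key : String) : List String → Option String
  | [] => none
  | c :: rest => if pvNorm c == key then some c else fbFind key rest

def fbStepA (clusters : PySem.Dict String (List String)) (name : String) :
    PySem.Dict String (List String) :=
  match fbFind (pvNorm name) clusters.keys with
  | some c => clusters.modify c [] (· ++ [name])   -- clusters[canonical].append(name)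
  | none => clusters.insert name [name]            -- clusters[name] = [name]

def fallback_cluster_py (names : List String) : List (String × List String) :=
  (names.foldl fbStepA PySem.Dict.empty).items

-- ===== PORT B =====
def fbStepB1 (st : PySem.Dict String String × PySem.Dict String (List String)) (name : String) :
    PySem.Dict String String × PySem.Dict String (List String) :=
  if st.1.contains (pvNorm name) then st
  else (st.1.insert (pvNorm name) name, st.2.insert name [])

-- result[index[key]].append(name); index[key] is always present, so the "" default is unreachable
def fbStepB2 (index : PySem.Dict String String) (res : PySem.Dict String (List String))
    (name : String) : PySem.Dict String (List String) :=
  res.modify (index.getD (pvNorm name) "") [] (· ++ [name])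

def fallback_cluster_py_alt (names : List String) : List (String × List String) :=
  let st := names.foldl fbStepB1 (PySem.Dict.empty, PySem.Dict.empty)
  (names.foldl (fbStepB2 st.1) st.2).items

-- ===== PRECONDITION & SPEC =====
def Spec_fallback_cluster_py (names : List String) (out : List (String × List String)) : Prop := out = fallback_cluster_py_alt names
instance (names : List String) (out : List (String × List String)) : Decidable (Spec_fallback_cluster_py names out) := by unfold Spec_fallback_cluster_py; infer_instance

-- ===== CLAIM (what is proved, stated in full; the proofs are below) =====
def Claim_equal_fallback_cluster_py : Prop := ∀ (names : List String), Dom_fallback_cluster_py names → Spec_fallback_cluster_py names (fallback_cluster_py names)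

-- ===== LEMMAS AND PROOFS =====

-- the canonical (first) names, per distinct normalized key, of l, given already-seen canonicals g
def fbFirsts (g : List String) : List String → List String
  | [] => []
  | n :: r =>
    match fbFind (pvNorm n) g with
    | some _ => fbFirsts g r
    | none => n :: fbFirsts (g ++ [n]) r

theorem fbFind_some {key c : String} : ∀ {ks : List String},
    fbFind key ks = some c → c ∈ ks ∧ pvNorm c = key := by
  intro ks h
  induction ks with
  | nil => simp [fbFind] at h
  | cons a t ih =>
    by_cases ha : pvNorm a == key
    · simp [fbFind, ha] at h
      subst h
      exact ⟨List.mem_cons_self, by simpa using ha⟩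
    · simp [fbFind, ha] at h
      rcases ih h with ⟨h1, h2⟩
      exact ⟨List.mem_cons_of_mem _ h1, h2⟩

theorem fbFind_none {key : String} : ∀ {ks : List String},
    fbFind key ks = none → ∀ c ∈ ks, pvNorm c ≠ key := by
  intro ks h
  induction ks with
  | nil => simp
  | cons a t ih =>
    by_cases ha : pvNorm a == key
    · simp [fbFind, ha] at h
    · simp [fbFind, ha] at h
      intro c hc
      rcases List.mem_cons.mp hc with rfl | hc
      · simpa using ha
      · exact ih h c hc

theorem fbFirsts_not_mem : ∀ (l g : List String) (c : String),
    c ∈ fbFirsts g l → pvNorm c ∉ g.map pvNorm := by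
  intro l
  induction l with
  | nil => intro g c h; simp [fbFirsts] at h
  | cons n r ih =>
    intro g c h
    rcases hf : fbFind (pvNorm n) g with _ | a
    · rw [fbFirsts, hf] at h
      rcases List.mem_cons.mp h with rfl | h
      · intro hmem
        rcases List.mem_map.mp hmem with ⟨a, ha, hae⟩
        exact fbFind_none hf a ha hae
      · intro hmem
        exact ih (g ++ [n]) c h (by simpa using Or.inl hmem)
    · rw [fbFirsts, hf] at h
      exact ih g c h

theorem fbFirsts_nodup : ∀ (l g : List String),
    ((g.map pvNorm).Nodup) → (((g ++ fbFirsts g l).map pvNorm).Nodup) := by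
  intro l
  induction l with
  | nil => intro g h; simpa [fbFirsts] using h
  | cons n r ih =>
    intro g h
    rcases hf : fbFind (pvNorm n) g with _ | a
    · rw [fbFirsts, hf]
      have h2 : (((g ++ [n]).map pvNorm).Nodup) := by
        rw [List.map_append]
        refine List.Nodup.append h (by simp) ?_
        intro x hx hy
        simp only [List.map_cons, List.map_nil, List.mem_singleton] at hy
        rcases List.mem_map.mp hx with ⟨a, ha, hae⟩
        exact fbFind_none hf a ha (by rw [hae, hy])
      have := ih (g ++ [n]) h2
      simpa [List.append_assoc] using this
    · rw [fbFirsts, hf]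
      exact ih g h

theorem fbFirsts_covers : ∀ (l g : List String) (n : String), n ∈ l →
    pvNorm n ∈ (g ++ fbFirsts g l).map pvNorm := by
  intro l
  induction l with
  | nil => intro g n h; simp at h
  | cons m r ih =>
    intro g n h
    rcases hf : fbFind (pvNorm m) g with _ | a
    · rw [fbFirsts, hf]
      rcases List.mem_cons.mp h with rfl | h
      · exact List.mem_map_of_mem (by simp)
      · have := ih (g ++ [m]) n h
        simpa [List.append_assoc] using this
    · rw [fbFirsts, hf]
      rcases List.mem_cons.mp h with rfl | h
      · rcases fbFind_some hf with ⟨ha, hae⟩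
        rw [← hae]
        exact List.mem_map_of_mem (List.mem_append_left _ ha)
      · exact ih g n h

theorem insert_items_fresh {ν : Type} (d : PySem.Dict String ν) (k : String) (v : ν)
    (h : d.contains k = false) : (d.insert k v).items = d.items ++ [(k, v)] := by
  simp [PySem.Dict.insert, h]

theorem find_assoc (c : String) : ∀ (l : List (String × List String)),
    (l.map Prod.fst).Nodup → ∀ p ∈ l, p.1 = c → l.find? (fun q => q.1 == c) = some p := by
  intro l
  induction l with
  | nil => intro _ p hp; simp at hp
  | cons q t ih =>
    intro hnd p hp hpc
    by_cases hq : q.1 = c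
    · have hpq : p = q := by
        rcases List.mem_cons.mp hp with rfl | hp'
        · rfl
        · exfalso
          rw [List.map_cons, List.nodup_cons] at hnd
          exact hnd.1 (hq ▸ hpc ▸ List.mem_map_of_mem hp')
      rw [List.find?_cons_of_pos (by simp [hq])]
      rw [hpq]
    · rcases List.mem_cons.mp hp with rfl | hp'
      · exact absurd hpc hq
      · rw [List.find?_cons_of_neg (by simp [hq])]
        rw [List.map_cons, List.nodup_cons] at hnd
        exact ih hnd.2 p hp' hpc

theorem map_set_eq (c : String) (f : List String → List String) :
    ∀ (l : List (String × List String)), (l.map Prod.fst).Nodup →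
    ∀ p0 ∈ l, p0.1 = c →
    l.map (fun p => if (p.1 == c) = true then (c, f p0.2) else p)
      = l.map (fun p => if p.1 = c then (c, f p.2) else p) := by
  intro l
  induction l with
  | nil => intro _ p0 hp0; simp at hp0
  | cons q t ih =>
    intro hnd p0 hp0 hp0c
    rw [List.map_cons, List.map_cons]
    rw [List.map_cons, List.nodup_cons] at hnd
    by_cases hq : q.1 = c
    · have hpq : p0 = q := by
        rcases List.mem_cons.mp hp0 with rfl | hp'
        · rfl
        · exact absurd (hq ▸ hp0c ▸ List.mem_map_of_mem hp') hnd.1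
      have htail : ∀ p ∈ t, p.1 ≠ c := by
        intro p hp hpc
        exact hnd.1 (hq ▸ hpc ▸ List.mem_map_of_mem hp)
      rw [if_pos (by simp [hq]), if_pos hq, hpq]
      congr 1
      refine List.map_congr_left (fun p hp => ?_)
      rw [if_neg (by simp [htail p hp]), if_neg (htail p hp)]
    · have hp0t : p0 ∈ t := by
        rcases List.mem_cons.mp hp0 with rfl | hp'
        · exact absurd hp0c hq
        · exact hp'
      rw [if_neg (by simp [hq]), if_neg hq]
      congr 1
      exact ih hnd.2 p0 hp0t hp0c

theorem modify_items (d : PySem.Dict String (List String)) (c : String)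
    (f : List String → List String) (hnd : d.keys.Nodup) (hc : c ∈ d.keys) :
    (d.modify c [] f).items = d.items.map (fun p => if p.1 = c then (c, f p.2) else p) := by
  obtain ⟨l⟩ := d
  simp only [PySem.Dict.keys, PySem.Dict.items] at hnd hc
  rcases List.mem_map.mp hc with ⟨p0, hp0, hp0c⟩
  have hcont : (PySem.Dict.mk l).contains c = true := by
    simp only [PySem.Dict.contains, PySem.Dict.items, List.any_eq_true]
    exact ⟨p0, hp0, by simp [hp0c]⟩
  have hfind : l.find? (fun q => q.1 == c) = some p0 := find_assoc c l hnd p0 hp0 hp0c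
  have hgetD : (PySem.Dict.mk l).getD c [] = p0.2 := by
    simp [PySem.Dict.getD, PySem.Dict.get?, PySem.Dict.items, hfind]
  rw [PySem.Dict.modify, PySem.Dict.insert, if_pos hcont, hgetD]
  exact map_set_eq c f l hnd p0 hp0 hp0c

theorem foldA_items : ∀ (l : List String) (d : PySem.Dict String (List String)),
    ((d.keys.map pvNorm).Nodup) →
    (l.foldl fbStepA d).items
      = d.items.map (fun p => (p.1, p.2 ++ l.filter (fun m => pvNorm m == pvNorm p.1)))
        ++ (fbFirsts d.keys l).map (fun c => (c, l.filter (fun m => pvNorm m == pvNorm c))) := by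
  intro l
  induction l with
  | nil => intro d _; simp [fbFirsts]
  | cons n r ih =>
    intro d hnd
    have hkND : d.keys.Nodup := List.Nodup.of_map _ hnd
    rw [List.foldl_cons]
    rcases hf : fbFind (pvNorm n) d.keys with _ | c
    · have hnone := fbFind_none hf
      have hnmem : n ∉ d.keys := fun hm => hnone n hm rfl
      have hcont : d.contains n = false := by
        rw [Bool.eq_false_iff]
        intro hc
        simp only [PySem.Dict.contains, List.any_eq_true] at hc
        rcases hc with ⟨p, hp, he⟩
        exact hnmem (beq_iff_eq.mp he ▸ List.mem_map_of_mem hp)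
      have hstep : fbStepA d n = d.insert n [n] := by rw [fbStepA, hf]
      have hitems : (d.insert n [n]).items = d.items ++ [(n, [n])] :=
        insert_items_fresh d n [n] hcont
      have hkeys : (d.insert n [n]).keys = d.keys ++ [n] := by
        simp [PySem.Dict.keys, hitems]
      have hnd2 : (((d.insert n [n]).keys).map pvNorm).Nodup := by
        rw [hkeys, List.map_append]
        refine List.Nodup.append hnd (by simp) ?_
        intro x hx hy
        simp only [List.map_cons, List.map_nil, List.mem_singleton] at hy
        rcases List.mem_map.mp hx with ⟨b, hb, hbe⟩
        exact hnone b hb (by rw [hbe, hy])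
      rw [hstep, ih _ hnd2, hitems, hkeys]
      simp only [fbFirsts, hf]
      rw [List.map_append]
      have e1 : d.items.map (fun p => (p.1, p.2 ++ r.filter (fun m => pvNorm m == pvNorm p.1)))
          = d.items.map (fun p => (p.1, p.2 ++ (n :: r).filter (fun m => pvNorm m == pvNorm p.1))) := by
        refine List.map_congr_left (fun p hp => ?_)
        rw [List.filter_cons, if_neg (by simp; exact fun hne => hnone p.1 (List.mem_map_of_mem hp) hne.symm)]
      have e3 : (fbFirsts (d.keys ++ [n]) r).map (fun c => (c, r.filter (fun m => pvNorm m == pvNorm c)))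
          = (fbFirsts (d.keys ++ [n]) r).map (fun c => (c, (n :: r).filter (fun m => pvNorm m == pvNorm c))) := by
        refine List.map_congr_left (fun c' hc' => ?_)
        have hnm := fbFirsts_not_mem r (d.keys ++ [n]) c' hc'
        rw [List.filter_cons, if_neg (by simp; intro hne; exact hnm (by rw [← hne]; simp))]
      rw [e1, e3]
      simp [List.filter_cons]
    · rcases fbFind_some hf with ⟨hck, hcn⟩
      have hstep : fbStepA d n = d.modify c [] (· ++ [n]) := by rw [fbStepA, hf]
      have hitems := modify_items d c (· ++ [n]) hkND hck
      have hkeys : (d.modify c [] (· ++ [n])).keys = d.keys := by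
        simp only [PySem.Dict.keys, hitems, List.map_map]
        refine List.map_congr_left (fun p _ => ?_)
        by_cases hp : p.1 = c <;> simp [hp, Function.comp]
      rw [hstep, ih _ (by rw [hkeys]; exact hnd), hkeys, hitems, List.map_map]
      simp only [fbFirsts, hf]
      have e3 : (fbFirsts d.keys r).map (fun c => (c, r.filter (fun m => pvNorm m == pvNorm c)))
          = (fbFirsts d.keys r).map (fun c => (c, (n :: r).filter (fun m => pvNorm m == pvNorm c))) := by
        refine List.map_congr_left (fun c' hc' => ?_)
        have hnm := fbFirsts_not_mem r d.keys c' hc'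
        rw [List.filter_cons, if_neg (by simp; intro hne; exact hnm (by rw [← hne, ← hcn]; exact List.mem_map_of_mem hck))]
      rw [← e3]
      congr 1
      refine List.map_congr_left (fun p hp => ?_)
      by_cases hpc : p.1 = c
      · simp only [Function.comp, if_pos hpc]
        rw [List.filter_cons, if_pos (by simp [hpc, hcn])]
        simp [hpc, List.append_assoc]
      · have hne : pvNorm p.1 ≠ pvNorm n := by
          rw [← hcn]
          intro he
          exact hpc (List.inj_on_of_nodup_map hnd (List.mem_map_of_mem hp) hck he)
        simp only [Function.comp, if_neg hpc]
        rw [List.filter_cons, if_neg (by simp; exact fun h2 => hne h2.symm)]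

theorem contains_index : ∀ (g : List String) (k : String),
    (PySem.Dict.mk (g.map (fun c => (pvNorm c, c)))).contains k = (fbFind k g).isSome := by
  intro g k
  induction g with
  | nil => rfl
  | cons a t ih =>
    by_cases ha : pvNorm a == k
    · simp [PySem.Dict.contains, fbFind, ha]
    · simp only [List.map_cons, PySem.Dict.contains, PySem.Dict.items, List.any_cons] at ih ⊢
      simp [fbFind, ha, ih]

theorem contains_res (g : List String) (n : String) (h : n ∉ g) :
    (PySem.Dict.mk (g.map (fun c => (c, ([] : List String))))).contains n = false := by
  rw [Bool.eq_false_iff]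
  intro hc
  simp only [PySem.Dict.contains, PySem.Dict.items, List.any_map, List.any_eq_true] at hc
  rcases hc with ⟨c, hcg, hcn⟩
  simp only [Function.comp] at hcn
  exact h ((beq_iff_eq.mp hcn) ▸ hcg)

theorem foldB1_state : ∀ (l g : List String), ((g.map pvNorm).Nodup) →
    l.foldl fbStepB1
        (PySem.Dict.mk (g.map (fun c => (pvNorm c, c))), PySem.Dict.mk (g.map (fun c => (c, ([] : List String)))))
      = (PySem.Dict.mk ((g ++ fbFirsts g l).map (fun c => (pvNorm c, c))),
         PySem.Dict.mk ((g ++ fbFirsts g l).map (fun c => (c, ([] : List String))))) := by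
  intro l
  induction l with
  | nil => intro g h; simp [fbFirsts]
  | cons n r ih =>
    intro g h
    rw [List.foldl_cons]
    rcases hf : fbFind (pvNorm n) g with _ | a
    · have hcont : (PySem.Dict.mk (g.map (fun c => (pvNorm c, c)))).contains (pvNorm n) = false := by
        rw [contains_index, hf]; rfl
      have hng : n ∉ g := fun hng => fbFind_none hf n hng rfl
      have hstep : fbStepB1
          (PySem.Dict.mk (g.map (fun c => (pvNorm c, c))), PySem.Dict.mk (g.map (fun c => (c, ([] : List String))))) n
          = (PySem.Dict.mk ((g ++ [n]).map (fun c => (pvNorm c, c))), PySem.Dict.mk ((g ++ [n]).map (fun c => (c, ([] : List String))))) := by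
        rw [fbStepB1]
        simp only [hcont, Bool.false_eq_true, if_false]
        refine Prod.ext ?_ ?_
        · apply PySem.Dict.ext
          rw [insert_items_fresh _ _ _ hcont]
          simp
        · apply PySem.Dict.ext
          rw [insert_items_fresh _ _ _ (contains_res g n hng)]
          simp
      rw [hstep]
      have h2 : (((g ++ [n]).map pvNorm).Nodup) := by
        rw [List.map_append]
        refine List.Nodup.append h (by simp) ?_
        intro x hx hy
        simp only [List.map_cons, List.map_nil, List.mem_singleton] at hy
        rcases List.mem_map.mp hx with ⟨b, hb, hbe⟩
        exact fbFind_none hf b hb (by rw [hbe, hy])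
      rw [ih (g ++ [n]) h2, fbFirsts, hf]
      simp [List.append_assoc]
    · have hcont : (PySem.Dict.mk (g.map (fun c => (pvNorm c, c)))).contains (pvNorm n) = true := by
        rw [contains_index, hf]; rfl
      have hstep : fbStepB1
          (PySem.Dict.mk (g.map (fun c => (pvNorm c, c))), PySem.Dict.mk (g.map (fun c => (c, ([] : List String))))) n
          = (PySem.Dict.mk (g.map (fun c => (pvNorm c, c))), PySem.Dict.mk (g.map (fun c => (c, ([] : List String))))) := by
        rw [fbStepB1]
        simp [hcont]
      rw [hstep, ih g h, fbFirsts, hf]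

theorem foldB2_items (I : PySem.Dict String String) :
    ∀ (l : List String) (R : PySem.Dict String (List String)), R.keys.Nodup →
    (∀ n ∈ l, I.getD (pvNorm n) "" ∈ R.keys) →
    (l.foldl (fbStepB2 I) R).items
      = R.items.map (fun p => (p.1, p.2 ++ l.filter (fun m => I.getD (pvNorm m) "" == p.1))) := by
  intro l
  induction l with
  | nil => intro R _ _; simp
  | cons n r ih =>
    intro R hnd hcov
    have hc : I.getD (pvNorm n) "" ∈ R.keys := hcov n List.mem_cons_self
    have hitems := modify_items R (I.getD (pvNorm n) "") (· ++ [n]) hnd hc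
    have hkeys : (R.modify (I.getD (pvNorm n) "") [] (· ++ [n])).keys = R.keys := by
      simp only [PySem.Dict.keys, hitems, List.map_map]
      refine List.map_congr_left (fun p _ => ?_)
      by_cases hp : p.1 = I.getD (pvNorm n) "" <;> simp [hp, Function.comp]
    rw [List.foldl_cons]
    show (r.foldl (fbStepB2 I) (fbStepB2 I R n)).items = _
    rw [ih (fbStepB2 I R n) (by rw [fbStepB2, hkeys]; exact hnd)
        (fun m hm => by rw [fbStepB2, hkeys]; exact hcov m (List.mem_cons_of_mem _ hm))]
    rw [fbStepB2, hitems, List.map_map]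
    refine List.map_congr_left (fun p _ => ?_)
    by_cases hp : p.1 = I.getD (pvNorm n) ""
    · simp only [Function.comp, if_pos hp, List.filter_cons]
      rw [if_pos (by simp [hp])]
      simp [hp, List.append_assoc]
    · simp only [Function.comp, if_neg hp, List.filter_cons]
      rw [if_neg (by simp; exact fun h => hp h.symm)]

theorem index_get (k : String) : ∀ (F : List String), k ∈ F.map pvNorm →
    ∃ c, c ∈ F ∧ pvNorm c = k ∧
      (PySem.Dict.mk (F.map (fun c => (pvNorm c, c)))).get? k = some c := by
  intro F
  induction F with
  | nil => simp
  | cons a t ih =>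
    intro hk
    by_cases ha : pvNorm a = k
    · refine ⟨a, List.mem_cons_self, ha, ?_⟩
      simp only [List.map_cons, PySem.Dict.get?, PySem.Dict.items]
      rw [List.find?_cons_of_pos (by simp [ha])]
      rfl
    · have hk2 : k ∈ t.map pvNorm := by
        have hk3 : k = pvNorm a ∨ ∃ b ∈ t, pvNorm b = k := by simpa using hk
        rcases hk3 with h | ⟨b, hb, hbe⟩
        · exact absurd h.symm ha
        · exact List.mem_map.mpr ⟨b, hb, hbe⟩
      rcases ih hk2 with ⟨c, hc1, hc2, hc3⟩
      refine ⟨c, List.mem_cons_of_mem _ hc1, hc2, ?_⟩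
      simp only [List.map_cons, PySem.Dict.get?, PySem.Dict.items] at hc3 ⊢
      rw [List.find?_cons_of_neg (by simp [ha])]
      exact hc3

-- ===== VERDICT (by name: the statement is the Claim_ definition above) =====
theorem fallback_cluster_py_spec : Claim_equal_fallback_cluster_py := by
  intro names _
  unfold Spec_fallback_cluster_py
  have hA : fallback_cluster_py names
      = (fbFirsts [] names).map (fun c => (c, names.filter (fun m => pvNorm m == pvNorm c))) := by
    rw [fallback_cluster_py]
    rw [foldA_items names PySem.Dict.empty (by simp [PySem.Dict.keys, PySem.Dict.empty])]
    simp [PySem.Dict.empty, PySem.Dict.keys]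
  have hndF : ((fbFirsts [] names).map pvNorm).Nodup := by
    simpa using fbFirsts_nodup names [] (by simp)
  have hFnd : (fbFirsts [] names).Nodup := List.Nodup.of_map _ hndF
  have hB1 : names.foldl fbStepB1 (PySem.Dict.empty, PySem.Dict.empty)
      = (PySem.Dict.mk ((fbFirsts [] names).map (fun c => (pvNorm c, c))),
         PySem.Dict.mk ((fbFirsts [] names).map (fun c => (c, ([] : List String))))) := by
    have h := foldB1_state names [] (by simp)
    simpa [PySem.Dict.empty] using h
  have hRkeys : (PySem.Dict.mk ((fbFirsts [] names).map (fun c => (c, ([] : List String))))).keys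
      = fbFirsts [] names := by
    simp only [PySem.Dict.keys, PySem.Dict.items, List.map_map]
    exact (List.map_congr_left fun a _ => rfl).trans (List.map_id _)
  have hcov : ∀ n ∈ names,
      (PySem.Dict.mk ((fbFirsts [] names).map (fun c => (pvNorm c, c)))).getD (pvNorm n) ""
        ∈ (PySem.Dict.mk ((fbFirsts [] names).map (fun c => (c, ([] : List String))))).keys := by
    intro n hn
    have hmem : pvNorm n ∈ (fbFirsts [] names).map pvNorm := by
      simpa using fbFirsts_covers names [] n hn
    rcases index_get (pvNorm n) (fbFirsts [] names) hmem with ⟨c, hc1, _, hc3⟩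
    have hgd : (PySem.Dict.mk ((fbFirsts [] names).map (fun c => (pvNorm c, c)))).getD (pvNorm n) "" = c := by
      simp [PySem.Dict.getD, hc3]
    rw [hgd, hRkeys]
    exact hc1
  have hB2 := foldB2_items (PySem.Dict.mk ((fbFirsts [] names).map (fun c => (pvNorm c, c))))
    names (PySem.Dict.mk ((fbFirsts [] names).map (fun c => (c, ([] : List String)))))
    (by rw [hRkeys]; exact hFnd) hcov
  have hB : fallback_cluster_py_alt names
      = (fbFirsts [] names).map (fun c => (c, names.filter (fun m =>
          (PySem.Dict.mk ((fbFirsts [] names).map (fun c => (pvNorm c, c)))).getD (pvNorm m) "" == c))) := by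
    show (names.foldl (fbStepB2 (names.foldl fbStepB1 (PySem.Dict.empty, PySem.Dict.empty)).1)
          (names.foldl fbStepB1 (PySem.Dict.empty, PySem.Dict.empty)).2).items = _
    rw [hB1]
    rw [hB2, List.map_map]
    refine List.map_congr_left (fun c _ => ?_)
    simp [Function.comp]
  rw [hA, hB]
  refine List.map_congr_left (fun c hc => ?_)
  refine congrArg (fun xs => (c, xs)) (List.filter_congr (fun m hm => ?_))
  have hmem : pvNorm m ∈ (fbFirsts [] names).map pvNorm := by
    simpa using fbFirsts_covers names [] m hm
  rcases index_get (pvNorm m) (fbFirsts [] names) hmem with ⟨cm, hcm1, hcm2, hcm3⟩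
  have hgd : (PySem.Dict.mk ((fbFirsts [] names).map (fun c => (pvNorm c, c)))).getD (pvNorm m) "" = cm := by
    simp [PySem.Dict.getD, hcm3]
  rw [hgd]
  by_cases he : cm = c
  · have e1 : (pvNorm m == pvNorm c) = true := by
      rw [beq_iff_eq, ← he, hcm2]
    have e2 : (cm == c) = true := by rw [beq_iff_eq]; exact he
    rw [e1, e2]
  · have hne : pvNorm m ≠ pvNorm c := by
      intro hh
      exact he (List.inj_on_of_nodup_map hndF hcm1 hc (by rw [hcm2, hh]))
    have e1 : (pvNorm m == pvNorm c) = false := by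
      rw [beq_eq_false_iff_ne]; exact hne
    have e2 : (cm == c) = false := by rw [beq_eq_false_iff_ne]; exact he
    rw [e1, e2]
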